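-- pv_equiv track=rewrite | github.com/juannyG/coms6998-llms-final-project | src/experiments/torch_gpipe.py | stage_block_range
-- ===== SOURCE A (Python) =====
-- from typing import Tuple, List
--
-- def stage_block_range(balance: List[int], rank: int, n_layers: int) -> Tuple[int, int, bool, bool]:
--     """
--     Given a balance vector and a rank, return:
--       start_block (inclusive), end_block (exclusive), include_embed, include_head
--     Blocks are indexed 0..n_layers-1. Embed sits before block 0; head sits after block n_layers-1.
--     """
--     # Turn module counts into prefix ranges over [embed][blocks...][head]
--     starts = [0]
--     for c in balance[:-1]:
--         starts.append(starts[-1] + c)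
--     ends = [s + c for s, c in zip(starts, balance)]
--
--     s, e = starts[rank], ends[rank]
--     include_embed = (s == 0)
--     include_head = (e == 1 + n_layers + 1)
--
--     # Map module indices to block indices: module 1..n_layers correspond to blocks 0..n_layers-1
--     start_block = max(0, s - 1)
--     end_block = min(n_layers, e - 1)
--     return start_block, end_block, include_embed, include_head
-- ===== SOURCE B (Python) =====
-- def stage_block_range(balance, rank, n_layers):
--     # Direct prefix sum for the one requested rank; no starts/ends tables.
--     s = sum(balance[:rank])
--     e = s + balance[rank]
--     return max(0, s - 1), min(n_layers, e - 1), s == 0, e == 1 + n_layers + 1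
-- ===== Notes on version B (the rewrite author's own statement) =====
-- stated objective: simpler
-- what changed: Instead of building the full starts/ends prefix tables and indexing them, B computes the single prefix sum s = sum(balance[:rank]) and e = s + balance[rank] directly for the requested rank.
import Mathlib
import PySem

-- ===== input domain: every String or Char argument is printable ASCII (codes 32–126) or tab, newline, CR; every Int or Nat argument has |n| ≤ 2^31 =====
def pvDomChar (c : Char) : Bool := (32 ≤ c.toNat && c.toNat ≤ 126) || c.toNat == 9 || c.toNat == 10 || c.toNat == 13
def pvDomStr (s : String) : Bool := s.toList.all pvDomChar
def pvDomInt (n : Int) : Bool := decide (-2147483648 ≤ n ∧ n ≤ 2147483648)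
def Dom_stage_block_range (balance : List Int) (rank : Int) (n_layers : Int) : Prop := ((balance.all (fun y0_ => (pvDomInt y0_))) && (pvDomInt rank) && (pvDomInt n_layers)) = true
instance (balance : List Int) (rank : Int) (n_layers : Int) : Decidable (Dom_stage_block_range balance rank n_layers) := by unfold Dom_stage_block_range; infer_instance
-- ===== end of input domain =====

-- B replaces A's full starts/ends prefix tables by one targeted prefix sum for the requested rank (simpler).


-- ===== PORT A =====
-- Literal port of A: build `starts` by appending starts[-1] + c for c in balance[:-1],
-- then ends = [s + c for s, c in zip(starts, balance)], then index both at `rank`.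
-- pyGetD is used under Pre_ (Python raises IndexError exactly outside Pre_).
def stage_block_range (balance : List Int) (rank : Int) (n_layers : Int) : Int × Int × Bool × Bool :=
  let starts : List Int :=
    (PySem.List.slice balance none (some (-1))).foldl
      (fun acc c => acc ++ [PySem.List.pyGetD acc (-1) 0 + c]) [0]
  let ends : List Int := (starts.zip balance).map (fun p => p.1 + p.2)
  let s := PySem.List.pyGetD starts rank 0
  let e := PySem.List.pyGetD ends rank 0
  let include_embed := decide (s = 0)
  let include_head := decide (e = 1 + n_layers + 1)
  let start_block := max 0 (s - 1)
  let end_block := min n_layers (e - 1)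
  (start_block, end_block, include_embed, include_head)

-- ===== PORT B =====
-- Literal port of B: s = sum(balance[:rank]); e = s + balance[rank].
def stage_block_range_alt (balance : List Int) (rank : Int) (n_layers : Int) : Int × Int × Bool × Bool :=
  let s := (PySem.List.slice balance none (some rank)).sum
  let e := s + PySem.List.pyGetD balance rank 0
  (max 0 (s - 1), min n_layers (e - 1), decide (s = 0), decide (e = 1 + n_layers + 1))

-- ===== PRECONDITION & SPEC =====
-- A raises IndexError (on starts[rank] or ends[rank]) exactly when rank is out of range for balance.
def Pre_stage_block_range (balance : List Int) (rank : Int) (n_layers : Int) : Prop :=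
  PySem.Raise.InRange balance.length rank
instance (balance : List Int) (rank : Int) (n_layers : Int) : Decidable (Pre_stage_block_range balance rank n_layers) := by unfold Pre_stage_block_range; infer_instance
def pvWitness_stage_block_range : List Int × Int × Int := ([1, 3, 2], 1, 4)

def Spec_stage_block_range (balance : List Int) (rank : Int) (n_layers : Int) (out : Int × Int × Bool × Bool) : Prop := out = stage_block_range_alt balance rank n_layers
instance (balance : List Int) (rank : Int) (n_layers : Int) (out : Int × Int × Bool × Bool) : Decidable (Spec_stage_block_range balance rank n_layers out) := by unfold Spec_stage_block_range; infer_instance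

-- ===== CLAIM (what is proved, stated in full; the proofs are below) =====
def Claim_equal_stage_block_range : Prop := ∀ (balance : List Int) (rank : Int) (n_layers : Int), Dom_stage_block_range balance rank n_layers → Pre_stage_block_range balance rank n_layers → Spec_stage_block_range balance rank n_layers (stage_block_range balance rank n_layers)

-- ===== LEMMAS AND PROOFS =====

-- A's append-loop over l starting from pre ++ [a] produces pre ++ scanl (+) a l.
lemma fold_starts (l : List Int) (pre : List Int) (a : Int) :
    l.foldl (fun acc c => acc ++ [PySem.List.pyGetD acc (-1) 0 + c]) (pre ++ [a])
      = pre ++ List.scanl (· + ·) a l := by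
  induction l generalizing pre a with
  | nil => simp
  | cons c l ih =>
    simp only [List.foldl_cons, PySem.List.pyGetD_neg_one_append_singleton, List.scanl_cons]
    rw [show pre ++ [a] ++ [a + c] = (pre ++ [a]) ++ [a + c] from rfl, ih]
    simp

-- index into scanl (+) a l is a plus the prefix sum.
lemma scanl_add_getD (l : List Int) (a : Int) (i : Nat) (hi : i ≤ l.length) :
    (List.scanl (· + ·) a l).getD i 0 = a + (l.take i).sum := by
  induction l generalizing a i with
  | nil =>
    have h0 : i = 0 := by simpa using hi
    subst h0; simp
  | cons c l ih =>
    cases i with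
    | zero => simp
    | succ i =>
      simp only [List.scanl_cons, List.getD, List.getElem?_cons_succ, List.take_succ_cons,
        List.sum_cons]
      have := ih (a + c) i (by simpa using hi)
      simp only [List.getD] at this
      rw [this]; ring

-- pyGetD at a (possibly negative) in-range Python index equals getD at the normalised Nat index.
lemma pyGetD_norm (xs : List Int) (rank : Int) (idx : Nat) (d : Int)
    (h : (if 0 ≤ rank then rank else rank + xs.length) = (idx : Int))
    (hlo : -(xs.length : Int) ≤ rank) :
    PySem.List.pyGetD xs rank d = xs.getD idx d := by
  by_cases h0 : 0 ≤ rank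
  · have hr : rank = (idx : Int) := by simp [h0] at h; omega
    rw [hr, PySem.List.pyGetD_natCast]
  · have hidx_lt : idx < xs.length := by simp [h0] at h; omega
    have hk : rank = -(((xs.length - idx : Nat) : Int)) := by
      simp [h0] at h; omega
    rw [hk, PySem.List.pyGetD_neg_natCast _ _ _ (by omega) (by omega),
      List.getD_eq_getElem _ _ (by omega)]
    congr 1
    omega

theorem stage_block_range_spec : Claim_equal_stage_block_range := by
  intro balance rank n_layers _ hpre
  unfold Pre_stage_block_range at hpre
  have hrange : -(balance.length : Int) ≤ rank ∧ rank < balance.length := by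
    simpa [PySem.Raise.InRange] using hpre
  set n : Nat := balance.length with hn
  have hnpos : 0 < n := by omega
  obtain ⟨idx, hidx_lt, hidx⟩ :
      ∃ idx : Nat, idx < n ∧ ((if 0 ≤ rank then rank else rank + n) = (idx : Int)) := by
    refine ⟨(if 0 ≤ rank then rank else rank + n).toNat, ?_, ?_⟩ <;> split_ifs <;> omega
  unfold Spec_stage_block_range stage_block_range stage_block_range_alt
  -- A's starts loop is scanl (+) 0 over balance[:-1]
  have hstarts :
      (PySem.List.slice balance none (some (-1))).foldl
        (fun acc c => acc ++ [PySem.List.pyGetD acc (-1) 0 + c]) [0]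
        = List.scanl (· + ·) 0 balance.dropLast := by
    rw [PySem.List.slice_to_neg_one]
    simpa using fold_starts balance.dropLast [] 0
  set starts := List.scanl (· + ·) 0 balance.dropLast with hst
  have hlen_starts : starts.length = n := by
    simp [hst, hn, List.length_scanl, List.length_dropLast]
    omega
  have hlen_ends : ((starts.zip balance).map (fun p => p.1 + p.2)).length = n := by
    simp [hlen_starts, hn]
  have htake : balance.dropLast.take idx = balance.take idx := by
    rw [List.dropLast_eq_take, List.take_take]
    congr 1
    omega
  have hstarts_idx : starts.getD idx 0 = (balance.take idx).sum := by
    rw [hst, scanl_add_getD _ _ _ (by simp [List.length_dropLast]; omega), htake]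
    ring
  -- A's s
  have hsA : PySem.List.pyGetD starts rank 0 = (balance.take idx).sum := by
    rw [pyGetD_norm starts rank idx 0 (by rw [hlen_starts]; exact hidx)
      (by rw [hlen_starts]; omega)]
    exact hstarts_idx
  -- B's s
  have hsB : (PySem.List.slice balance none (some rank)).sum = (balance.take idx).sum := by
    by_cases h0 : 0 ≤ rank
    · rw [PySem.List.slice_to balance h0]
      congr 2
      simp [h0] at hidx; omega
    · have hk : rank = -(((n - idx : Nat) : Int)) := by
        simp [h0] at hidx; omega
      rw [hk, PySem.List.slice_to_neg_natCast _ _ (by omega)]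
      have h2 : balance.length - (n - idx) = idx := by omega
      rw [h2]
  -- balance[rank]
  have hbal : PySem.List.pyGetD balance rank 0 = balance.getD idx 0 :=
    pyGetD_norm balance rank idx 0 hidx (by omega)
  -- A's e
  have heA : PySem.List.pyGetD ((starts.zip balance).map (fun p => p.1 + p.2)) rank 0
      = (balance.take idx).sum + balance.getD idx 0 := by
    rw [pyGetD_norm _ rank idx 0 (by rw [hlen_ends]; exact hidx)
      (by rw [hlen_ends]; omega)]
    rw [List.getD_eq_getElem _ _ (by rw [hlen_ends]; omega)]
    rw [List.getElem_map, List.getElem_zip]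
    rw [← List.getD_eq_getElem starts 0 (by omega), hstarts_idx,
      ← List.getD_eq_getElem balance 0 (by omega)]
  simp only [hstarts, hsA, hsB, heA, hbal]
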